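-- pv_equiv track=rewrite | github.com/TDasha/homework-repository | homework1/task05.py | find_maximal_subarray_sum
-- ===== SOURCE A (Python) =====
-- from typing import List
--
-- def find_maximal_subarray_sum(nums: List[int], k: int) -> int:
--     maximal_subarr_sum = nums[0]
--     end = k
--     max_sum_list = []
--
--     for start in range(len(nums) - k + 1):
--         max_sum = 0
--         sorted_nums = sorted(nums[start:end], reverse=True)
--         for item in sorted_nums:
--             max_sum += item
--             max_sum_list.append(max_sum)
--         end += 1
--
--     for item in max_sum_list:
--         if item > maximal_subarr_sum:
--             maximal_subarr_sum = item
--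
--     return maximal_subarr_sum
-- ===== SOURCE B (Python) =====
-- def find_maximal_subarray_sum(nums, k):
--     best = nums[0]
--     for start in range(len(nums) - k + 1):
--         wmax = nums[start]
--         possum = wmax if wmax > 0 else 0
--         for i in range(start + 1, start + k):
--             v = nums[i]
--             if v > wmax:
--                 wmax = v
--             if v > 0:
--                 possum += v
--         cand = possum if wmax > 0 else wmax
--         if cand > best:
--             best = cand
--     return best
-- ===== Notes on version B (the rewrite author's own statement) =====
-- stated objective: faster
-- what changed: B drops A's per-window descending sort and the global list of all n*k prefix sums: for each window it makes one plain pass keeping the window maximum and the sum of its positive elements (the best prefix of the sorted window is the positive sum, or the maximum if none is positive), updating the running best directly.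
-- outside the precondition, e.g. on find_maximal_subarray_sum([3, -1], 0): A returns 3, B raises IndexError; on find_maximal_subarray_sum([3, -1], -1): A returns 3, B raises IndexError
import Mathlib
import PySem

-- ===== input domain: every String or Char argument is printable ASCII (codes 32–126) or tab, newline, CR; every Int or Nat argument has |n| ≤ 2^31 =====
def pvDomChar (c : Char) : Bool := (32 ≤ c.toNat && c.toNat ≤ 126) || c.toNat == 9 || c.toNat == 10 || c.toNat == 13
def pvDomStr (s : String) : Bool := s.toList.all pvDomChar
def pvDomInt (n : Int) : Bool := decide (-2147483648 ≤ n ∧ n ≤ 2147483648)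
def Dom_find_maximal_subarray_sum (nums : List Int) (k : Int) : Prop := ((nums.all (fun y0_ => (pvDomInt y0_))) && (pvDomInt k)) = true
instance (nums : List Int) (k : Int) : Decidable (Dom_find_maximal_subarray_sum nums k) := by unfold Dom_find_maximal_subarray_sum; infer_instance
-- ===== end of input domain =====

-- B replaces A's per-window sort + global prefix-sum list by a single per-window pass
-- keeping (window max, sum of positive elements).

-- ===== PORT A =====
def find_maximal_subarray_sum (nums : List Int) (k : Int) : Int :=
  let maximal_subarr_sum := (PySem.List.pyGet? nums 0).getD 0   -- nums[0]; Pre_ excludes the raising case nums = []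
  let st := (PySem.List.pyRange 0 ((nums.length : Int) - k + 1) 1).foldl
    (fun (st : Int × List Int) start =>
      let sorted_nums := PySem.List.sorted (PySem.List.slice nums (some start) (some st.1)) (fun x => x) true
      let inner := sorted_nums.foldl
        (fun (p : Int × List Int) item => (p.1 + item, p.2 ++ [p.1 + item])) (0, st.2)
      (st.1 + 1, inner.2))
    (k, ([] : List Int))
  st.2.foldl (fun m item => if item > m then item else m) maximal_subarr_sum

-- ===== PORT B =====
def find_maximal_subarray_sum_alt (nums : List Int) (k : Int) : Int :=
  (PySem.List.pyRange 0 ((nums.length : Int) - k + 1) 1).foldl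
    (fun best start =>
      let w0 := PySem.List.pyGetD nums start 0   -- nums[start]; in range under Pre_
      let p := (PySem.List.pyRange (start + 1) (start + k) 1).foldl
        (fun (p : Int × Int) i =>
          let v := PySem.List.pyGetD nums i 0    -- nums[i]; in range under Pre_
          (if v > p.1 then v else p.1, if v > 0 then p.2 + v else p.2))
        (w0, if w0 > 0 then w0 else 0)
      let cand := if p.1 > 0 then p.2 else p.1
      if cand > best then cand else best)
    ((PySem.List.pyGet? nums 0).getD 0)

-- ===== PRECONDITION & SPEC =====
-- Pre_ excludes empty nums (A raises IndexError on nums[0]) and k ≤ 0, where A's returned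
-- value is an artefact of Python's empty/negative-end slices and B's index loop itself
-- raises IndexError.
def Pre_find_maximal_subarray_sum (nums : List Int) (k : Int) : Prop := nums ≠ [] ∧ 1 ≤ k
instance (nums : List Int) (k : Int) : Decidable (Pre_find_maximal_subarray_sum nums k) := by unfold Pre_find_maximal_subarray_sum; infer_instance
def pvWitness_find_maximal_subarray_sum : List Int × Int := ([1, -2, 3], 2)

def Spec_find_maximal_subarray_sum (nums : List Int) (k : Int) (out : Int) : Prop := out = find_maximal_subarray_sum_alt nums k
instance (nums : List Int) (k : Int) (out : Int) : Decidable (Spec_find_maximal_subarray_sum nums k out) := by unfold Spec_find_maximal_subarray_sum; infer_instance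

-- ===== CLAIM (what is proved, stated in full; the proofs are below) =====
def Claim_equal_find_maximal_subarray_sum : Prop := ∀ (nums : List Int) (k : Int), Dom_find_maximal_subarray_sum nums k → Pre_find_maximal_subarray_sum nums k → Spec_find_maximal_subarray_sum nums k (find_maximal_subarray_sum nums k)

-- ===== LEMMAS AND PROOFS =====

-- prefix sums with running offset c (what A's inner loop appends)
def pvPrefList (c : Int) : List Int → List Int
  | [] => []
  | x :: t => (c + x) :: pvPrefList (c + x) t

-- sum of the positive elements
def pvPosSum : List Int → Int
  | [] => 0
  | x :: t => (if x > 0 then x else 0) + pvPosSum t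

-- value of one window given its DESC-SORTED form: head > 0 → positive sum, else head
def pvK : List Int → Int
  | [] => 0
  | x :: t => if x > 0 then pvPosSum (x :: t) else x

theorem pvPosSum_nonneg (l : List Int) : 0 ≤ pvPosSum l := by
  induction l with
  | nil => simp [pvPosSum]
  | cons x t ih => simp only [pvPosSum]; split <;> omega

theorem pvPosSum_eq_sum_map (l : List Int) :
    pvPosSum l = (l.map (fun v => if v > 0 then v else 0)).sum := by
  induction l with
  | nil => rfl
  | cons x t ih => simp [pvPosSum, ih]

theorem pvPosSum_perm {l₁ l₂ : List Int} (h : l₁.Perm l₂) : pvPosSum l₁ = pvPosSum l₂ := by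
  rw [pvPosSum_eq_sum_map, pvPosSum_eq_sum_map]
  exact ((h.map _).sum_eq)

theorem pvPosSum_eq_zero_of_nonpos {l : List Int} (h : ∀ x ∈ l, x ≤ 0) : pvPosSum l = 0 := by
  induction l with
  | nil => rfl
  | cons x t ih =>
    have hx := h x (by simp)
    simp only [pvPosSum, if_neg (by omega : ¬ x > 0), ih (fun y hy => h y (by simp [hy])), add_zero]

-- CORE: folding max over the prefix sums (offset c) of a desc-sorted nonempty list
theorem pvFoldlMax_prefList (s : List Int) (hs : s.Pairwise (· ≥ ·)) (hne : s ≠ []) :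
    ∀ (a c : Int), (pvPrefList c s).foldl max a = max a (c + pvK s) := by
  induction s with
  | nil => exact absurd rfl hne
  | cons x t ih =>
    intro a c
    match t, hs with
    | [], _ => simp [pvPrefList, pvK, pvPosSum]; split <;> omega
    | y :: t', hs =>
      have hxy : x ≥ y := (List.pairwise_cons.1 hs).1 y (by simp)
      have hts : (y :: t').Pairwise (· ≥ ·) := (List.pairwise_cons.1 hs).2
      rw [show pvPrefList c (x :: y :: t') = (c + x) :: pvPrefList (c + x) (y :: t') from rfl,
        List.foldl_cons, ih hts (by simp) (max a (c + x)) (c + x)]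
      by_cases hy : y > 0
      · have hx : 0 < x := by omega
        have hp : 0 < pvPosSum (y :: t') := by
          have := pvPosSum_nonneg t'
          simp only [pvPosSum, if_pos hy]; omega
        have e1 : pvK (y :: t') = pvPosSum (y :: t') := by simp [pvK, hy]
        have e2 : pvK (x :: y :: t') = x + pvPosSum (y :: t') := by
          show (if x > 0 then pvPosSum (x :: y :: t') else x) = _
          rw [if_pos (by omega : x > 0),
            show pvPosSum (x :: y :: t') = (if x > 0 then x else 0) + pvPosSum (y :: t') from rfl,
            if_pos (by omega : x > 0)]
        rw [e1, e2]
        omega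
      · have hall : ∀ z ∈ (y :: t'), z ≤ 0 := by
          intro z hz
          rcases List.mem_cons.1 hz with h | h
          · omega
          · have := (List.pairwise_cons.1 hts).1 z h; omega
        have hzero : pvPosSum (y :: t') = 0 := pvPosSum_eq_zero_of_nonpos hall
        have e1 : pvK (y :: t') = y := by simp [pvK]; omega
        have e2 : pvK (x :: y :: t') = x := by
          show (if x > 0 then pvPosSum (x :: y :: t') else x) = x
          split
          · rw [show pvPosSum (x :: y :: t') = (if x > 0 then x else 0) + pvPosSum (y :: t') from rfl,
              hzero]
            split <;> omega
          · rfl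
        rw [e1, e2]
        omega

-- A's inner loop: appends the running prefix sums
theorem pvInnerA (l : List Int) : ∀ (c : Int) (acc : List Int),
    l.foldl (fun (p : Int × List Int) item => (p.1 + item, p.2 ++ [p.1 + item])) (c, acc)
      = (c + l.sum, acc ++ pvPrefList c l) := by
  induction l with
  | nil => intro c acc; simp [pvPrefList]
  | cons x t ih =>
    intro c acc
    simp only [List.foldl_cons, ih, pvPrefList, List.sum_cons, Prod.mk.injEq]
    constructor
    · ring
    · simp

-- the window starting at s (A slices it; B walks its indices)
def pvWin (nums : List Int) (k s : Int) : List Int :=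
  PySem.List.slice nums (some s) (some (k + s))

-- A's loop body with the inner loop summarised by pvInnerA
def pvStepA (nums : List Int) (st : Int × List Int) (start : Int) : Int × List Int :=
  (st.1 + 1, st.2 ++ pvPrefList 0 (PySem.List.sorted (PySem.List.slice nums (some start) (some st.1)) (fun x => x) true))

theorem pvStepA_eq (nums : List Int) :
    (fun (st : Int × List Int) start =>
      let sorted_nums := PySem.List.sorted (PySem.List.slice nums (some start) (some st.1)) (fun x => x) true
      let inner := sorted_nums.foldl
        (fun (p : Int × List Int) item => (p.1 + item, p.2 ++ [p.1 + item])) (0, st.2)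
      (st.1 + 1, inner.2))
    = pvStepA nums := by
  funext st start
  simp [pvStepA, pvInnerA]

-- A's outer loop: the list it builds is the concatenation of per-window prefix-sum lists
theorem pvOuterA (nums : List Int) (k : Int) : ∀ (m : Nat) (a : Int) (acc : List Int),
    ((PySem.List.pyRange a (a + (m : Int)) 1).foldl (pvStepA nums) (k + a, acc)).2
    = acc ++ (PySem.List.pyRange a (a + (m : Int)) 1).flatMap
        (fun s => pvPrefList 0 (PySem.List.sorted (pvWin nums k s) (fun x => x) true)) := by
  intro m
  induction m with
  | zero => intro a acc; simp [PySem.List.pyRange_one_eq_nil]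
  | succ m ih =>
    intro a acc
    rw [PySem.List.pyRange_one_cons (by omega : a < a + ((m + 1 : Nat) : Int))]
    have h1 : a + ((m + 1 : Nat) : Int) = (a + 1) + (m : Int) := by push_cast; ring
    rw [h1, List.foldl_cons, List.flatMap_cons]
    have h2 : pvStepA nums (k + a, acc) a
        = (k + (a + 1), acc ++ pvPrefList 0 (PySem.List.sorted (pvWin nums k a) (fun x => x) true)) := by
      show (k + a + 1, acc ++ pvPrefList 0 (PySem.List.sorted (PySem.List.slice nums (some a) (some (k + a))) (fun x => x) true)) = _
      rw [pvWin, show k + a + 1 = k + (a + 1) from by ring]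
    rw [h2, ih (a + 1), List.append_assoc]

-- A, reorganised: fold Python's running max over the concatenated prefix-sum lists
theorem pvA_eq (nums : List Int) (k : Int) : find_maximal_subarray_sum nums k =
    ((PySem.List.pyRange 0 ((nums.length : Int) - k + 1) 1).flatMap
      (fun s => pvPrefList 0 (PySem.List.sorted (pvWin nums k s) (fun x => x) true))).foldl
      (fun m item => if item > m then item else m) ((PySem.List.pyGet? nums 0).getD 0) := by
  simp only [find_maximal_subarray_sum]
  rw [pvStepA_eq]
  by_cases hn : (nums.length : Int) - k + 1 ≤ 0
  · rw [PySem.List.pyRange_one_eq_nil hn]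
    simp
  · have hm : (nums.length : Int) - k + 1 = 0 + ((((nums.length : Int) - k + 1).toNat : Nat) : Int) := by omega
    rw [hm, show (k, ([] : List Int)) = (k + 0, ([] : List Int)) from by simp,
      pvOuterA nums k (((nums.length : Int) - k + 1).toNat) 0 []]
    simp

-- folding max over a concatenation, window by window
theorem pvFoldlMax_flatMap (f : Int → List Int) : ∀ (L : List Int) (a : Int),
    (L.flatMap f).foldl max a = L.foldl (fun acc s => (f s).foldl max acc) a := by
  intro L
  induction L with
  | nil => simp
  | cons s t ih => intro a; simp [List.flatMap_cons, List.foldl_append, ih]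

-- Python's 'if item > m: m = item' is max
theorem pvIfMax (l : List Int) (a : Int) :
    l.foldl (fun m item => if item > m then item else m) a = l.foldl max a := by
  refine PySem.List.foldl_congr_mem _ _ _ _ (fun m item _ => ?_)
  rw [max_def]
  split <;> split <;> omega

-- pyGetD over an index range is the slice (0 ≤ a, a + m ≤ len)
theorem pvMap_pyGetD_slice (nums : List Int) : ∀ (m : Nat) (a : Int), 0 ≤ a →
    a + (m : Int) ≤ (nums.length : Int) →
    (PySem.List.pyRange a (a + (m : Int)) 1).map (fun i => PySem.List.pyGetD nums i 0)
      = PySem.List.slice nums (some a) (some (a + (m : Int))) := by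
  intro m
  induction m with
  | zero =>
    intro a ha hb
    rw [PySem.List.pyRange_one_eq_nil (by omega)]
    rw [PySem.List.slice_toNat nums ha (by omega)]
    simp
  | succ m ih =>
    intro a ha hb
    have hlt : a.toNat < nums.length := by omega
    rw [PySem.List.pyRange_one_cons (by omega : a < a + ((m + 1 : Nat) : Int))]
    have h1 : a + ((m + 1 : Nat) : Int) = (a + 1) + (m : Int) := by push_cast; ring
    rw [h1]
    simp only [List.map_cons]
    rw [ih (a + 1) (by omega) (by omega)]
    rw [PySem.List.slice_toNat nums ha (by omega),
      PySem.List.slice_toNat nums (by omega : (0 : Int) ≤ a + 1) (by omega)]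
    rw [PySem.List.pyGetD_eq_getElem nums 0 ha (by omega)]
    rw [List.drop_eq_getElem_cons hlt]
    have h2 : (a + 1 + (m : Int)).toNat - a.toNat = m + 1 := by omega
    have h3 : (a + 1 + (m : Int)).toNat - (a + 1).toNat = m := by omega
    have h4 : (a + 1).toNat = a.toNat + 1 := by omega
    rw [h2, h3, h4, List.take_succ_cons]

-- the head of the desc-sorted window is the window's running max
theorem pvSortedHead (hd : Int) (T : List Int) (h : Int) (tl : List Int)
    (hw : PySem.List.sorted (hd :: T) (fun x => x) true = h :: tl) :
    h = T.foldl max hd := by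
  have hperm : (h :: tl).Perm (hd :: T) := by
    rw [← hw]; exact PySem.List.sorted_perm ..
  have hpw : (h :: tl).Pairwise (fun a b => b ≤ a) := by
    rw [← hw]; exact PySem.List.sorted_pairwise_rev ..
  have hmax : ∀ z ∈ (hd :: T), z ≤ h := by
    intro z hz
    rcases List.mem_cons.1 ((hperm.mem_iff).2 hz) with h1 | h1
    · omega
    · exact (List.pairwise_cons.1 hpw).1 z h1
  have hfm := PySem.List.le_foldl_max T hd
  have hmem : T.foldl max hd ∈ (hd :: T) := by
    rcases PySem.List.foldl_max_mem T hd with h1 | h1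
    · rw [h1]; simp
    · exact List.mem_cons_of_mem _ h1
  have hh : h ∈ (hd :: T) := hperm.mem_iff.1 (by simp)
  have h1 : T.foldl max hd ≤ h := hmax _ hmem
  have h2 : h ≤ T.foldl max hd := by
    rcases List.mem_cons.1 hh with he | hm
    · rw [he]; exact hfm.1
    · exact hfm.2 _ hm
  omega

-- B's index loop with pyGetD, as an element loop over the mapped list
theorem pvInnerB' (nums : List Int) (r : List Int) : ∀ (wm ps : Int),
    r.foldl (fun (p : Int × Int) i =>
        (if PySem.List.pyGetD nums i 0 > p.1 then PySem.List.pyGetD nums i 0 else p.1,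
         if PySem.List.pyGetD nums i 0 > 0 then p.2 + PySem.List.pyGetD nums i 0 else p.2)) (wm, ps)
      = ((r.map (fun i => PySem.List.pyGetD nums i 0)).foldl max wm,
         ps + pvPosSum (r.map (fun i => PySem.List.pyGetD nums i 0))) := by
  induction r with
  | nil => intro wm ps; simp [pvPosSum]
  | cons i r ih =>
    intro wm ps
    simp only [List.foldl_cons, List.map_cons, ih, Prod.mk.injEq]
    constructor
    · have h : (if PySem.List.pyGetD nums i 0 > wm then PySem.List.pyGetD nums i 0 else wm)
          = max wm (PySem.List.pyGetD nums i 0) := by omega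
      rw [h]
    · rw [show pvPosSum (PySem.List.pyGetD nums i 0 :: r.map (fun i => PySem.List.pyGetD nums i 0))
          = (if PySem.List.pyGetD nums i 0 > 0 then PySem.List.pyGetD nums i 0 else 0)
            + pvPosSum (r.map (fun i => PySem.List.pyGetD nums i 0)) from rfl]
      split <;> omega

-- per-window value: A's max over prefix sums of the sorted window = B's candidate step
theorem pvWindow (nums : List Int) (k s : Int) (a : Int) (hk : 1 ≤ k) (hs : 0 ≤ s)
    (hb : s + k ≤ (nums.length : Int)) :
    (pvPrefList 0 (PySem.List.sorted (pvWin nums k s) (fun x => x) true)).foldl max a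
      = (let w0 := PySem.List.pyGetD nums s 0
         let p := (PySem.List.pyRange (s + 1) (s + k) 1).foldl
          (fun (p : Int × Int) i =>
            let v := PySem.List.pyGetD nums i 0
            (if v > p.1 then v else p.1, if v > 0 then p.2 + v else p.2))
          (w0, if w0 > 0 then w0 else 0)
         let cand := if p.1 > 0 then p.2 else p.1
         if cand > a then cand else a) := by
  have hsl : s.toNat < nums.length := by omega
  have hw0 : PySem.List.pyGetD nums s 0 = nums[s.toNat] :=
    PySem.List.pyGetD_eq_getElem nums 0 hs (by omega)
  obtain ⟨n', hn'⟩ : ∃ n', (k + s).toNat - s.toNat = n' + 1 := ⟨(k + s).toNat - s.toNat - 1, by omega⟩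
  -- the window as head :: tail
  have hwin : pvWin nums k s
      = nums[s.toNat] :: List.take n' (List.drop (s.toNat + 1) nums) := by
    rw [pvWin, PySem.List.slice_toNat nums hs (by omega), hn',
      List.drop_eq_getElem_cons hsl, List.take_succ_cons]
  set T := List.take n' (List.drop (s.toNat + 1) nums) with hT
  -- B's index range maps exactly onto the window's tail
  have htail : (PySem.List.pyRange (s + 1) (s + k) 1).map (fun i => PySem.List.pyGetD nums i 0) = T := by
    have h1 : s + k = (s + 1) + (((k - 1).toNat : Nat) : Int) := by omega
    rw [h1, pvMap_pyGetD_slice nums (k - 1).toNat (s + 1) (by omega) (by omega),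
      PySem.List.slice_toNat nums (by omega : (0 : Int) ≤ s + 1) (by omega), hT,
      show (s + 1 + ((k - 1).toNat : Int)).toNat - (s + 1).toNat = n' from by omega,
      show (s + 1).toNat = s.toNat + 1 from by omega]
  -- sorted window is nonempty
  obtain ⟨h, tl, hsrt⟩ : ∃ h tl, PySem.List.sorted (pvWin nums k s) (fun x => x) true = h :: tl := by
    rcases he : PySem.List.sorted (pvWin nums k s) (fun x => x) true with _ | ⟨h, tl⟩
    · rw [PySem.List.sorted_eq_nil_iff] at he
      rw [hwin] at he; cases he
    · exact ⟨h, tl, rfl⟩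
  -- left side via the core lemma
  have hpair : (h :: tl).Pairwise (· ≥ ·) := by
    rw [← hsrt]; exact PySem.List.sorted_pairwise_rev ..
  have hL : (pvPrefList 0 (PySem.List.sorted (pvWin nums k s) (fun x => x) true)).foldl max a
      = max a (pvK (h :: tl)) := by
    rw [hsrt, pvFoldlMax_prefList (h :: tl) hpair (by simp) a 0, zero_add]
  -- right side via B's loop shape
  have hR := pvInnerB' nums (PySem.List.pyRange (s + 1) (s + k) 1)
    nums[s.toNat] (if nums[s.toNat] > 0 then nums[s.toNat] else 0)
  rw [htail] at hR
  -- identify the two window values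
  have hhead : h = T.foldl max nums[s.toNat] := by
    apply pvSortedHead nums[s.toNat] T h tl
    rw [← hwin, hsrt]
  have hposs : pvPosSum (h :: tl) = (if nums[s.toNat] > 0 then nums[s.toNat] else 0) + pvPosSum T := by
    have hperm : (h :: tl).Perm (pvWin nums k s) := by
      rw [← hsrt]; exact PySem.List.sorted_perm ..
    rw [pvPosSum_perm hperm, hwin]
    rfl
  rw [hL]
  simp only [hw0, hR]
  rw [show pvK (h :: tl) = if h > 0 then pvPosSum (h :: tl) else h from rfl, hposs, ← hhead]
  omega

-- ===== VERDICT (by name: the statement is the Claim_ definition above) =====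
theorem find_maximal_subarray_sum_spec : Claim_equal_find_maximal_subarray_sum := by
  intro nums k _ hpre
  obtain ⟨hne, hk⟩ := hpre
  unfold Spec_find_maximal_subarray_sum
  rw [pvA_eq, pvIfMax, pvFoldlMax_flatMap]
  unfold find_maximal_subarray_sum_alt
  refine PySem.List.foldl_congr_mem _ _ _ _ (fun acc s hsmem => ?_)
  rw [PySem.List.mem_pyRange_one] at hsmem
  exact pvWindow nums k s acc hk hsmem.1 (by omega)
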